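-- pv_equiv track=rewrite | github.com/GGLAB-KU/paradise | data-creation/filters.py | source_tutorial_filter
-- ===== SOURCE A (Python) =====
-- def source_tutorial_filter(positive_candidate, negative_candidates, source_file):
--   positive_candidate_tutorial = [k for k, v in source_file.items() if positive_candidate in v][0]
--   negative_candidate_tutorials = []
--
--   for negative_candidate in negative_candidates:
--     negative_candidate_tutorial = [k for k, v in source_file.items() if negative_candidate in v][0]
--     negative_candidate_tutorials.append(negative_candidate_tutorial)
--
--   source_tutorials = [positive_candidate_tutorial] + negative_candidate_tutorials
--
--   if len(set(source_tutorials)) == 4: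
--     return True
--   else:
--     return False
-- ===== SOURCE B (Python) =====
-- def source_tutorial_filter(positive_candidate, negative_candidates, source_file):
--     # Build a reverse index once: element -> first tutorial (in dict order) containing it.
--     index = {}
--     for k, v in source_file.items():
--         for element in v:
--             index.setdefault(element, k)
--     tutorials = {index[positive_candidate]}
--     for negative_candidate in negative_candidates:
--         tutorials.add(index[negative_candidate])
--     return len(tutorials) == 4
-- ===== Notes on version B (the rewrite author's own statement) =====
-- stated objective: faster
-- what changed: Replaces A's per-candidate full scan of source_file (a filter-comprehension per candidate) with a reverse index element->first-containing-key built in one pass, then O(1) dict lookups per candidate.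
import Mathlib
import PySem

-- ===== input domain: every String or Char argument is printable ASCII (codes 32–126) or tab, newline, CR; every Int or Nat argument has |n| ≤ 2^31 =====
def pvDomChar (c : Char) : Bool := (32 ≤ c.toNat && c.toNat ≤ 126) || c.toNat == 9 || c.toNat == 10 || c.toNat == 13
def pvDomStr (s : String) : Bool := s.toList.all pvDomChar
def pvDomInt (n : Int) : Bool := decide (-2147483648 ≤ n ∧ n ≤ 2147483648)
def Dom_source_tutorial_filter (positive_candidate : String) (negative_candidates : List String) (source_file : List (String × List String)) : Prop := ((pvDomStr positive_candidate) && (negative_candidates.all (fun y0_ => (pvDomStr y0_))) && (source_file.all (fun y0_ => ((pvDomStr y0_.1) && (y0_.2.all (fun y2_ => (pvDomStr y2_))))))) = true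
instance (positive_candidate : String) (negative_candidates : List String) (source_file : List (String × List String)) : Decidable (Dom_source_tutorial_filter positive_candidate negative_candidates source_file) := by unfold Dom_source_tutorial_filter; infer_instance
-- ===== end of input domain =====

-- B replaces A's per-candidate full scan of source_file with a reverse index (element -> first key containing it)
-- built in one pass, then a dict lookup per candidate; return value only, no side effects.

-- ===== PORT A =====
-- '[k for k, v in source_file.items() if cand in v][0]' : first key whose value list contains cand;
-- the '[0]' IndexError (cand in no list) is excluded by Pre_, so '.getD ""' is only reached outside Pre_.
def pvFirstKeyA (cand : String) (source_file : List (String × List String)) : String :=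
  ((PySem.List.pyGet? ((source_file.filter (fun p => p.2.contains cand)).map Prod.fst) 0)).getD ""

def source_tutorial_filter (positive_candidate : String) (negative_candidates : List String) (source_file : List (String × List String)) : Bool :=
  let positive_candidate_tutorial := pvFirstKeyA positive_candidate source_file
  let negative_candidate_tutorials :=
    negative_candidates.foldl (fun acc nc => acc ++ [pvFirstKeyA nc source_file]) []
  let source_tutorials := [positive_candidate_tutorial] ++ negative_candidate_tutorials
  if PySem.Set.len (PySem.Set.ofList source_tutorials) = 4 then true else false

-- ===== PORT B =====
-- index.setdefault(element, k) over all (k, v) and elements of v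
def pvIndexB (source_file : List (String × List String)) : PySem.Dict String String :=
  source_file.foldl
    (fun index p => p.2.foldl (fun index element => PySem.Dict.setdefault index element p.1) index)
    PySem.Dict.empty

-- 'index[cand]'; the KeyError (cand not indexed) is excluded by Pre_, so '.getD ""' is only reached outside Pre_.
def pvLookupB (index : PySem.Dict String String) (cand : String) : String :=
  (index.get? cand).getD ""

def source_tutorial_filter_alt (positive_candidate : String) (negative_candidates : List String) (source_file : List (String × List String)) : Bool :=
  let index := pvIndexB source_file
  let tutorials := PySem.Set.ofList [pvLookupB index positive_candidate]
  let tutorials := negative_candidates.foldl (fun s nc => PySem.Set.add s (pvLookupB index nc)) tutorials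
  decide (PySem.Set.len tutorials = 4)

-- ===== PRECONDITION & SPEC =====
-- Exactly the inputs where Python A returns: every candidate occurs in some value list of source_file
-- (otherwise A's '[...][0]' raises IndexError; B raises KeyError there).
def Pre_source_tutorial_filter (positive_candidate : String) (negative_candidates : List String) (source_file : List (String × List String)) : Prop :=
  (∃ p ∈ source_file, positive_candidate ∈ p.2) ∧
  ∀ nc ∈ negative_candidates, ∃ p ∈ source_file, nc ∈ p.2
instance (positive_candidate : String) (negative_candidates : List String) (source_file : List (String × List String)) : Decidable (Pre_source_tutorial_filter positive_candidate negative_candidates source_file) := by unfold Pre_source_tutorial_filter; infer_instance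

def pvWitness_source_tutorial_filter : String × List String × (List (String × List String)) :=
  ("a", ["b", "c", "d"], [("t1", ["a"]), ("t2", ["b"]), ("t3", ["c"]), ("t4", ["d"])])

def Spec_source_tutorial_filter (positive_candidate : String) (negative_candidates : List String) (source_file : List (String × List String)) (out : Bool) : Prop := out = source_tutorial_filter_alt positive_candidate negative_candidates source_file
instance (positive_candidate : String) (negative_candidates : List String) (source_file : List (String × List String)) (out : Bool) : Decidable (Spec_source_tutorial_filter positive_candidate negative_candidates source_file out) := by unfold Spec_source_tutorial_filter; infer_instance

-- ===== CLAIM (what is proved, stated in full; the proofs are below) =====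
def Claim_equal_source_tutorial_filter : Prop := ∀ (positive_candidate : String) (negative_candidates : List String) (source_file : List (String × List String)), Dom_source_tutorial_filter positive_candidate negative_candidates source_file → Pre_source_tutorial_filter positive_candidate negative_candidates source_file → Spec_source_tutorial_filter positive_candidate negative_candidates source_file (source_tutorial_filter positive_candidate negative_candidates source_file)

-- ===== LEMMAS AND PROOFS =====

lemma pyGet?_zero_head? (l : List String) : PySem.List.pyGet? l 0 = l.head? := by
  cases l <;> simp [PySem.List.pyGet?, PySem.List.pyIdx?]

lemma get?_setdefault (d : PySem.Dict String String) (x k cand : String) :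
    (d.setdefault x k).get? cand = if cand = x then some ((d.get? cand).getD k) else d.get? cand := by
  by_cases hc : d.contains x
  · have hd : d.setdefault x k = d := by simp [PySem.Dict.setdefault, hc]
    rw [hd]
    by_cases he : cand = x
    · subst he
      have h2 := PySem.Dict.contains_eq_isSome_get? (d := d) (k := cand)
      rw [hc] at h2
      obtain ⟨w, hw⟩ := Option.isSome_iff_exists.mp h2.symm
      simp [hw]
    · simp [he]
  · have hd : d.setdefault x k = d.insert x k := by
      simp [PySem.Dict.setdefault, hc, PySem.Dict.insert]
    rw [hd, PySem.Dict.get?_insert]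
    by_cases he : cand = x
    · subst he
      have hn : d.get? cand = none := by
        have h2 := PySem.Dict.contains_eq_isSome_get? (d := d) (k := cand)
        exact Option.not_isSome_iff_eq_none.mp (by rw [← h2]; simpa using hc)
      simp [hn]
    · simp [he]

-- setdefault over one value list: an existing binding survives; otherwise cand gets k iff cand ∈ v
lemma get?_foldl_setdefault (v : List String) (k cand : String) (d : PySem.Dict String String) :
    (v.foldl (fun index element => PySem.Dict.setdefault index element k) d).get? cand
      = (d.get? cand).or (if cand ∈ v then some k else none) := by
  induction v generalizing d with
  | nil => simp
  | cons x xs ih =>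
      simp only [List.foldl_cons, ih, get?_setdefault]
      by_cases he : cand = x
      · subst he
        cases d.get? cand <;> simp
      · simp [he]

-- the reverse index looks up exactly A's "first key whose list contains cand"
lemma get?_pvIndexB (source_file : List (String × List String)) (cand : String) :
    (pvIndexB source_file).get? cand
      = PySem.List.pyGet? ((source_file.filter (fun p => p.2.contains cand)).map Prod.fst) 0 := by
  unfold pvIndexB
  rw [pyGet?_zero_head?]
  have main : ∀ (sf : List (String × List String)) (d : PySem.Dict String String),
      (sf.foldl (fun index p => p.2.foldl (fun index element => PySem.Dict.setdefault index element p.1) index) d).get? cand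
        = (d.get? cand).or ((sf.filter (fun p => p.2.contains cand)).map Prod.fst).head? := by
    intro sf
    induction sf with
    | nil => simp
    | cons p rest ih =>
        intro d
        simp only [List.foldl_cons, ih, get?_foldl_setdefault]
        by_cases hv : cand ∈ p.2
        · cases d.get? cand <;> simp [hv]
        · simp [hv]
  rw [main]
  simp [PySem.Dict.get?_empty]

lemma lookupB_eq_firstKeyA (source_file : List (String × List String)) (cand : String) :
    pvLookupB (pvIndexB source_file) cand = pvFirstKeyA cand source_file := by
  simp [pvLookupB, pvFirstKeyA, get?_pvIndexB]

-- the two ports agree on EVERY input (outside Pre_ both default to "")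
lemma ports_agree (positive_candidate : String) (negative_candidates : List String) (source_file : List (String × List String)) :
    source_tutorial_filter positive_candidate negative_candidates source_file
      = source_tutorial_filter_alt positive_candidate negative_candidates source_file := by
  unfold source_tutorial_filter source_tutorial_filter_alt
  simp only [lookupB_eq_firstKeyA, PySem.List.foldl_append_singleton_eq_map, List.nil_append]
  have hset : PySem.Set.ofList ([pvFirstKeyA positive_candidate source_file]
                ++ negative_candidates.map (fun nc => pvFirstKeyA nc source_file))
      = negative_candidates.foldl
          (fun s nc => PySem.Set.add s (pvFirstKeyA nc source_file))
          (PySem.Set.ofList [pvFirstKeyA positive_candidate source_file]) := by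
    rw [PySem.Set.ofList_eq_foldl, PySem.Set.ofList_eq_foldl]
    rw [List.foldl_append, List.foldl_map]
  rw [hset]
  split <;> simp_all

-- ===== VERDICT (by name: the statement is the Claim_ definition above) =====
theorem source_tutorial_filter_spec : Claim_equal_source_tutorial_filter := by
  intro pc ncs sf _ _
  unfold Spec_source_tutorial_filter
  exact ports_agree pc ncs sf
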